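-- pv_equiv track=rewrite | github.com/daniel-reich/turbo-robot | KLke67efuam6ajLrt_16.py | shuffle_count
-- ===== SOURCE A (Python) =====
-- def shuffle_count(num):
--     lst = list(range(1,num+1))
--     count = 0
--     new_list = []
--     pos = [i for i in range(len(lst)) if i%2!=0]
--     while True:
--         newlist = lst[:len(lst)//2]
--         for i in range(len(pos)):
--             newlist.insert(pos[i],lst[len(lst)//2:][i])
--
--         count+=1
--         if newlist == list(range(1,num+1)):
--             return count
--         else:
--             lst = newlist
-- ===== SOURCE B (Python) =====
-- def shuffle_count(num):
--     # A deck of no cards is back in order after the first shuffle.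
--     if num <= 0:
--         return 1
--     # One riffle shuffle sends the card at 0-based position p (p < num-1)
--     # to position 2*p mod (num-1), so the deck is back in order after k
--     # shuffles exactly when 2**k == 1 (mod num-1): return that order.
--     m = num - 1
--     k, x = 1, 2 % m
--     while x != 1 % m:
--         x = x * 2 % m
--         k += 1
--     return k
-- ===== Notes on version B (the rewrite author's own statement) =====
-- stated objective: faster
-- what changed: Instead of repeatedly shuffling the whole deck until it returns to identity, B observes that one riffle sends 0-based position p to 2p mod (num-1), so the count is the multiplicative order of 2 modulo num-1, computed by iterating a single residue.
import Mathlib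
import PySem

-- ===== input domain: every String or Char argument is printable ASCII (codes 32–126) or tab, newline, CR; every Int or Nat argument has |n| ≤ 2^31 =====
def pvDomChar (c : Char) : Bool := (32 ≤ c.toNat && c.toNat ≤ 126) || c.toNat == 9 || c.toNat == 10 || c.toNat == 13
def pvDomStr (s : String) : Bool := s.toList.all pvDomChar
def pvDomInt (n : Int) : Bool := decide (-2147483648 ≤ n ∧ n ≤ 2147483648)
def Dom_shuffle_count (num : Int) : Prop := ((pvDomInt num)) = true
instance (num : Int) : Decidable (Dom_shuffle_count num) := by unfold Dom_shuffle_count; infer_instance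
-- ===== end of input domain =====

-- B replaces A's repeated full-deck simulation (insert-based riffle until the deck is the
-- identity again) by iterating a single residue: the count is the multiplicative order of
-- 2 modulo num-1. Measured asymptotically faster.

-- ===== PORT A =====

-- list(range(1, num+1))
def pvAIdent (num : Int) : List Int := PySem.List.pyRange 1 (num + 1) 1

-- one body of the while loop: newlist = lst[:len(lst)//2]; then the insert loop
def pvARound (pos lst : List Int) : List Int :=
  (PySem.List.pyRange 0 (pos.length) 1).foldl
    (fun nl i =>
      PySem.List.insert nl (PySem.List.pyGetD pos i 0)
        (PySem.List.pyGetD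
          (PySem.List.slice lst (some (PySem.Int.floordiv (lst.length) 2)) none) i 0))
    (PySem.List.slice lst none (some (PySem.Int.floordiv (lst.length) 2)))

-- while True: … (fuel makes it total; 0 at exhaustion is unreachable on Pre_)
def pvALoop (num : Int) (pos : List Int) : Nat → List Int → Int → Int
  | 0, _, _ => 0
  | f + 1, lst, count =>
    let newlist := pvARound pos lst
    let count := count + 1
    if newlist = pvAIdent num then count
    else pvALoop num pos f newlist count

def shuffle_count (num : Int) : Int :=
  let lst := pvAIdent num
  let pos := (PySem.List.pyRange 0 (lst.length) 1).filter
    (fun i => !(PySem.Int.mod i 2 == 0))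
  pvALoop num pos (num.toNat + 1) lst 0

-- ===== PORT B =====

-- while x != 1 % m: x = x * 2 % m; k += 1   (fuel makes it total; 0 at exhaustion unreachable on Pre_)
def pvBLoop : Nat → Int → Int → Int → Int
  | 0, _, _, _ => 0
  | f + 1, m, x, k =>
    if x = PySem.Int.mod 1 m then k
    else pvBLoop f m (PySem.Int.mod (x * 2) m) (k + 1)

def shuffle_count_alt (num : Int) : Int :=
  if num ≤ 0 then 1
  else pvBLoop (num.toNat + 1) (num - 1) (PySem.Int.mod 2 (num - 1)) 1

-- ===== PRECONDITION & SPEC =====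
-- A's while loop never terminates on positive odd num (the half-split with the stale
-- `pos` list shrinks the deck forever); Pre_ excludes exactly those inputs.
def Pre_shuffle_count (num : Int) : Prop := num ≤ 0 ∨ PySem.Int.mod num 2 = 0
instance (num : Int) : Decidable (Pre_shuffle_count num) := by
  unfold Pre_shuffle_count; infer_instance

def pvWitness_shuffle_count : Int := 8

def Spec_shuffle_count (num : Int) (out : Int) : Prop := out = shuffle_count_alt num
instance (num : Int) (out : Int) : Decidable (Spec_shuffle_count num out) := by
  unfold Spec_shuffle_count; infer_instance

-- ===== CLAIM (what is proved, stated in full; the proofs are below) =====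
def Claim_equal_shuffle_count : Prop :=
  ∀ (num : Int), Dom_shuffle_count num → Pre_shuffle_count num →
    Spec_shuffle_count num (shuffle_count num)

-- ===== LEMMAS AND PROOFS =====

-- the riffle as an index map: new position i takes the card from old position pvG N i
def pvG (N i : Nat) : Nat := if i % 2 = 0 then i / 2 else N / 2 + i / 2

def pvGIter (N : Nat) : Nat → Nat → Nat
  | 0, i => i
  | c + 1, i => pvGIter N c (pvG N i)

-- the deck after c shuffles
def pvLstL (N c : Nat) : List Int :=
  (List.range N).map (fun i => ((pvGIter N c i : Nat) : Int) + 1)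

-- perfect interleave of two equal-length halves
def pvInter : List Int → List Int → List Int
  | x :: xs, y :: ys => x :: y :: pvInter xs ys
  | xs, [] => xs
  | [], ys => ys

theorem pvInter_length : ∀ (a b : List Int), a.length = b.length →
    (pvInter a b).length = 2 * a.length := by
  intro a
  induction a with
  | nil => intro b hb; cases b <;> simp_all [pvInter]
  | cons x xs ih =>
    intro b hb
    cases b with
    | nil => simp at hb
    | cons y ys =>
      simp [pvInter] at hb ⊢
      rw [ih ys hb]; omega

theorem pvInter_getD : ∀ (a b : List Int), a.length = b.length →
    ∀ i, i < 2 * a.length →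
    (pvInter a b).getD i 0 = if i % 2 = 0 then a.getD (i / 2) 0 else b.getD (i / 2) 0 := by
  intro a
  induction a with
  | nil => intro b hb i hi; simp at hi
  | cons x xs ih =>
    intro b hb i hi
    cases b with
    | nil => simp at hb
    | cons y ys =>
      simp only [List.length_cons] at hb
      match i with
      | 0 => simp [pvInter]
      | 1 => simp [pvInter]
      | (j + 2) =>
        have hj : j < 2 * xs.length := by simp at hi; omega
        have := ih ys (by omega) j hj
        simp only [pvInter, List.getD_cons_succ]
        rw [this]
        have h2 : (j + 2) % 2 = j % 2 := by omega
        have h3 : (j + 2) / 2 = j / 2 + 1 := by omega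
        rw [h2, h3]
        split <;> simp

-- the insert loop builds the interleave
theorem pvInsertLoop : ∀ (n j : Nat) (pre a2 b : List Int),
    pre.length = 2 * j → a2.length = n → j + n ≤ b.length →
    List.foldl
      (fun nl (jj : Nat) => PySem.List.insert nl (2 * (jj : Int) + 1) (b.getD jj 0))
      (pre ++ a2) (List.range' j n)
    = pre ++ pvInter a2 ((b.drop j).take n) := by
  intro n
  induction n with
  | zero =>
    intro j pre a2 b hpre ha2 hb
    rw [List.length_eq_zero_iff] at ha2
    subst ha2
    simp [pvInter]
  | succ n ih =>
    intro j pre a2 b hpre ha2 hb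
    match a2 with
    | [] => simp at ha2
    | x :: a2' =>
      rw [List.range'_succ, List.foldl_cons]
      have hcast : (2 * (j : Int) + 1) = ((2 * j + 1 : Nat) : Int) := by push_cast; ring
      have hlen : 2 * j + 1 ≤ (pre ++ x :: a2').length := by
        simp; omega
      rw [hcast, PySem.List.insert_natCast _ _ _ hlen]
      have htake : (pre ++ x :: a2').take (2 * j + 1) = pre ++ [x] := by
        rw [List.take_append]
        have h1 : 2 * j + 1 - pre.length = 1 := by omega
        rw [List.take_of_length_le (by omega), h1]
        simp [List.take_succ_cons]
      have hdrop : (pre ++ x :: a2').drop (2 * j + 1) = a2' := by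
        rw [List.drop_append]
        have h1 : 2 * j + 1 - pre.length = 1 := by omega
        rw [List.drop_of_length_le (by omega), h1]
        simp
      rw [htake, hdrop]
      have hres := ih (j + 1) (pre ++ [x, b.getD j 0]) a2' b (by simp; omega)
        (by simpa using ha2) (by omega)
      have hassoc : pre ++ [x] ++ b.getD j 0 :: a2'
          = (pre ++ [x, b.getD j 0]) ++ a2' := by simp
      have hbj : b.drop j = b[j] :: b.drop (j + 1) := by
        exact (List.getElem_cons_drop (by omega)).symm
      have hg : b.getD j 0 = b[j] := by
        rw [List.getD_eq_getElem _ _ (by omega)]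
      rw [hassoc, hres, hbj, List.take_succ_cons]
      simp only [pvInter, hg]
      simp

-- characterize A's pos list: the odd indices 1,3,…,2h-1
theorem pvPosNat : ∀ (h : Nat),
    (List.range (2 * h)).filter (fun k => decide (k % 2 = 1))
      = (List.range h).map (fun j => 2 * j + 1) := by
  intro h
  induction h with
  | zero => rfl
  | succ h ih =>
    have h1 : 2 * (h + 1) = (2 * h + 1) + 1 := by omega
    rw [h1, List.range_succ, List.filter_append, List.range_succ, List.filter_append, ih,
      List.range_succ]
    have h2 : (2 * h) % 2 = 0 := by omega
    have h3 : (2 * h + 1) % 2 = 1 := by omega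
    simp [h2, h3]

theorem pvPosChar (h : Nat) :
    (PySem.List.pyRange 0 ((2 * h : Nat) : Int) 1).filter (fun i => !(PySem.Int.mod i 2 == 0))
      = (List.range h).map (fun (j : Nat) => (2 * (j : Int) + 1)) := by
  rw [PySem.List.pyRange_one]
  have htn : ((2 * h : Nat) : Int) - 0 = ((2 * h : Nat) : Int) := by ring
  rw [htn, Int.toNat_natCast]
  rw [List.filter_map]
  have hpred : ∀ k ∈ List.range (2 * h),
      ((fun i => !(PySem.Int.mod i 2 == 0)) ∘ (fun k : Nat => (0 : Int) + ↑k)) k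
        = decide (k % 2 = 1) := by
    intro k _
    have hm : PySem.Int.mod ((0 : Int) + ↑k) 2 = ((k % 2 : Nat) : Int) := by
      rw [PySem.Int.mod_eq_emod_of_pos (by norm_num), zero_add]
      omega
    simp only [Function.comp, hm]
    rcases Nat.mod_two_eq_zero_or_one k with hk | hk <;> simp [hk]
  rw [List.filter_congr hpred, pvPosNat]
  simp only [List.map_map]
  apply List.ext_getElem (by simp)
  intro i h1 h2
  simp only [List.getElem_map, List.getElem_range, Function.comp]
  push_cast
  ring

-- interleaving the two halves of the deck after c shuffles gives the deck after c+1
theorem pvInter_halves (N c : Nat) (hN : N % 2 = 0) :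
    pvInter ((pvLstL N c).take (N / 2)) ((pvLstL N c).drop (N / 2)) = pvLstL N (c + 1) := by
  have hlen : (pvLstL N c).length = N := by simp [pvLstL]
  have hta : ((pvLstL N c).take (N / 2)).length = N / 2 := by simp [hlen]; omega
  have htb : ((pvLstL N c).drop (N / 2)).length = N / 2 := by simp [hlen]; omega
  apply List.ext_getElem
  · rw [pvInter_length _ _ (hta.trans htb.symm), hta]
    simp [pvLstL]; omega
  · intro i hi1 hi2
    have hiN : i < N := by
      rw [pvInter_length _ _ (hta.trans htb.symm), hta] at hi1; omega
    have h1 : (pvInter ((pvLstL N c).take (N / 2)) ((pvLstL N c).drop (N / 2)))[i]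
        = (pvInter ((pvLstL N c).take (N / 2)) ((pvLstL N c).drop (N / 2))).getD i 0 := by
      rw [List.getD_eq_getElem _ _ hi1]
    rw [h1, pvInter_getD _ _ (hta.trans htb.symm) i (by rw [hta]; omega)]
    have hhalf : i / 2 < N / 2 := by omega
    have hrhs : (pvLstL N (c + 1))[i] = ((pvGIter N c (pvG N i) : Nat) : Int) + 1 := by
      simp [pvLstL, List.getElem_map, List.getElem_range, pvGIter]
    rw [hrhs]
    unfold pvG
    split
    · rw [List.getD_eq_getElem _ _ (by rw [hta]; omega), List.getElem_take]
      simp [pvLstL, List.getElem_map, List.getElem_range]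
    · rw [List.getD_eq_getElem _ _ (by rw [htb]; omega), List.getElem_drop]
      simp [pvLstL, List.getElem_map, List.getElem_range]

-- one round on a deck of even length N is the pvG-indexed remap
theorem pvRound_lstL (N c : Nat) (hN : N % 2 = 0) :
    pvARound ((List.range (N / 2)).map (fun (j : Nat) => (2 * (j : Int) + 1))) (pvLstL N c)
      = pvLstL N (c + 1) := by
  have hlen : (pvLstL N c).length = N := by simp [pvLstL]
  unfold pvARound
  have hfd : PySem.Int.floordiv ((pvLstL N c).length : Int) 2 = ((N / 2 : Nat) : Int) := by
    rw [hlen]; exact_mod_cast PySem.Int.floordiv_natCast N 2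
  rw [hfd, PySem.List.slice_to_natCast, PySem.List.slice_from_natCast]
  have hplen : (((List.range (N / 2)).map (fun (j : Nat) => (2 * (j : Int) + 1))).length) = N / 2 := by
    simp
  rw [hplen, PySem.List.pyRange_one]
  have htn : (((N / 2 : Nat) : Int) - 0).toNat = N / 2 := by omega
  rw [htn, List.foldl_map]
  have hstep : ∀ (nl : List Int) (k : Nat), k ∈ List.range (N / 2) →
      PySem.List.insert nl
        (PySem.List.pyGetD ((List.range (N / 2)).map (fun (j : Nat) => (2 * (j : Int) + 1))) ((0 : Int) + ↑k) 0)
        (PySem.List.pyGetD ((pvLstL N c).drop (N / 2)) ((0 : Int) + ↑k) 0)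
      = PySem.List.insert nl (2 * (k : Int) + 1) (((pvLstL N c).drop (N / 2)).getD k 0) := by
    intro nl k hk
    rw [List.mem_range] at hk
    rw [zero_add, PySem.List.pyGetD_natCast, PySem.List.pyGetD_natCast]
    congr 1
    rw [List.getD_eq_getElem _ _ (by simp; omega), List.getElem_map, List.getElem_range]
  rw [PySem.List.foldl_congr_mem _ _ _ _ hstep]
  have hres := pvInsertLoop (N / 2) 0 [] ((pvLstL N c).take (N / 2)) ((pvLstL N c).drop (N / 2))
    (by simp) (by simp [hlen]; omega) (by simp [hlen]; omega)
  rw [← List.range_eq_range'] at hres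
  simp only [List.nil_append, List.drop_zero] at hres
  have htake2 : List.take (N / 2) (List.drop (N / 2) (pvLstL N c))
      = List.drop (N / 2) (pvLstL N c) :=
    List.take_of_length_le (by simp [hlen]; omega)
  rw [htake2] at hres
  rw [hres]
  exact pvInter_halves N c hN

-- modular facts
theorem pvG_lt (N i : Nat) (hN : N % 2 = 0) (hi : i < N) : pvG N i < N := by
  unfold pvG; split <;> omega

theorem pvG_lt_pred (N i : Nat) (hN : N % 2 = 0) (hi : i + 1 < N) : pvG N i + 1 < N := by
  unfold pvG; split <;> omega

theorem pvG_fix (N : Nat) (hN : N % 2 = 0) (h2 : 2 ≤ N) : pvG N (N - 1) = N - 1 := by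
  unfold pvG
  have : (N - 1) % 2 = 1 := by omega
  rw [this]
  simp; omega

theorem pvG_cong (N i : Nat) (hN : N % 2 = 0) (hi : i < N) :
    2 * pvG N i ≡ i [MOD (N - 1)] := by
  unfold pvG
  split
  · have : 2 * (i / 2) = i := by omega
    rw [this]
  · have : 2 * (N / 2 + i / 2) = i + (N - 1) := by omega
    rw [this]
    exact Nat.add_modEq_right

theorem pvGIter_lt_pred (N c i : Nat) (hN : N % 2 = 0) (hi : i + 1 < N) :
    pvGIter N c i + 1 < N := by
  induction c generalizing i with
  | zero => simpa [pvGIter]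
  | succ c ih => exact ih _ (pvG_lt_pred N i hN hi)

theorem pvGIter_fix (N c : Nat) (hN : N % 2 = 0) (h2 : 2 ≤ N) :
    pvGIter N c (N - 1) = N - 1 := by
  induction c with
  | zero => rfl
  | succ c ih => simpa [pvGIter, pvG_fix N hN h2]

theorem pvGIter_cong (N c i : Nat) (hN : N % 2 = 0) (hi : i < N) :
    2 ^ c * pvGIter N c i ≡ i [MOD (N - 1)] := by
  induction c generalizing i with
  | zero => simp [pvGIter]; rfl
  | succ c ih =>
    have h1 := ih (pvG N i) (pvG_lt N i hN hi)
    have h2 := pvG_cong N i hN hi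
    calc 2 ^ (c + 1) * pvGIter N (c + 1) i
        = 2 * (2 ^ c * pvGIter N c (pvG N i)) := by rw [pvGIter]; ring
      _ ≡ 2 * pvG N i [MOD (N - 1)] := Nat.ModEq.mul_left 2 h1
      _ ≡ i [MOD (N - 1)] := h2

-- identity test ↔ power of two test
theorem pvId_iff (N c : Nat) (hN : N % 2 = 0) (h2 : 2 ≤ N) :
    (∀ i, i < N → pvGIter N c i = i) ↔ 2 ^ c % (N - 1) = 1 % (N - 1) := by
  constructor
  · intro h
    by_cases hm : N - 1 = 1
    · simp [hm, Nat.mod_one]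
    · have h1N : 1 + 1 < N := by omega
      have := pvGIter_cong N c 1 hN (by omega)
      rw [h 1 (by omega)] at this
      simpa [Nat.ModEq] using this
  · intro h i hi
    by_cases hlast : i = N - 1
    · rw [hlast]; exact pvGIter_fix N c hN h2
    · have hi1 : i + 1 < N := by omega
      have hc := pvGIter_cong N c i hN hi
      have hlt := pvGIter_lt_pred N c i hN hi1
      have hmul : 2 ^ c * pvGIter N c i ≡ 1 * pvGIter N c i [MOD (N - 1)] :=
        Nat.ModEq.mul_right _ h
      have h3 : (pvGIter N c i) ≡ i [MOD (N - 1)] := by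
        have := (hmul.symm).trans hc
        simpa using this
      unfold Nat.ModEq at h3
      rw [Nat.mod_eq_of_lt (by omega), Nat.mod_eq_of_lt (by omega)] at h3
      omega

theorem pvLstL_eq_iff (N c : Nat) :
    (pvLstL N c = pvLstL N 0) ↔ (∀ i, i < N → pvGIter N c i = i) := by
  constructor
  · intro h i hi
    have h1 : (pvLstL N c)[i]'(by simpa [pvLstL]) = (pvLstL N 0)[i]'(by simpa [pvLstL]) := by
      simp only [h]
    simp only [pvLstL, List.getElem_map, List.getElem_range] at h1
    have : pvGIter N c i = pvGIter N 0 i := by exact_mod_cast add_right_cancel h1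
    simpa [pvGIter] using this
  · intro h
    unfold pvLstL
    apply List.map_congr_left
    intro i hi
    rw [List.mem_range] at hi
    simp [pvGIter, h i hi]

-- identity of the deck ↔ power-of-two condition, over Int
theorem pvIdent_lstL (num : Int) (h : 0 ≤ num) :
    pvAIdent num = pvLstL num.toNat 0 := by
  unfold pvAIdent pvLstL
  rw [PySem.List.pyRange_one]
  have h1 : (num + 1 - 1).toNat = num.toNat := by omega
  rw [h1]
  apply List.map_congr_left
  intro i _
  simp [pvGIter]
  ring

-- the synchronized loops
theorem pvSync (num : Int) (h2 : 2 ≤ num) (hev : PySem.Int.mod num 2 = 0) :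
    ∀ (f : Nat) (c : Nat),
      pvALoop num ((List.range (num.toNat / 2)).map (fun (j : Nat) => (2 * (j : Int) + 1)))
        f (pvLstL num.toNat c) (c : Int)
      = pvBLoop f (num - 1) (PySem.Int.mod (2 ^ (c + 1)) (num - 1)) ((c : Int) + 1) := by
  have hnn : (0 : Int) ≤ num := by omega
  have hnum : ((num.toNat : Nat) : Int) = num := Int.toNat_of_nonneg hnn
  have hNev : num.toNat % 2 = 0 := by
    rw [PySem.Int.mod_eq_emod_of_pos (by norm_num)] at hev
    omega
  have hN2 : 2 ≤ num.toNat := by omega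
  have hmpos : (0 : Int) < num - 1 := by omega
  have hmcast : num - 1 = (((num.toNat - 1 : Nat)) : Int) := by omega
  -- the two exit conditions agree at every step
  have hcond : ∀ d : Nat,
      (pvLstL num.toNat d = pvAIdent num
        ↔ PySem.Int.mod (2 ^ d) (num - 1) = PySem.Int.mod 1 (num - 1)) := by
    intro d
    rw [pvIdent_lstL num hnn, pvLstL_eq_iff, pvId_iff _ _ hNev hN2]
    rw [PySem.Int.mod_eq_emod_of_pos hmpos, PySem.Int.mod_eq_emod_of_pos hmpos, hmcast]
    have hpow : ((2 : Int) ^ d) = (((2 ^ d : Nat)) : Int) := by push_cast; ring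
    rw [hpow]
    rw [← Int.natCast_emod, ← Int.natCast_one, ← Int.natCast_emod]
    exact ⟨fun h => by exact_mod_cast congrArg (fun x : Nat => (x : Int)) h,
           fun h => by exact_mod_cast h⟩
  intro f
  induction f with
  | zero => intro c; rfl
  | succ f ih =>
    intro c
    simp only [pvALoop, pvBLoop]
    rw [pvRound_lstL num.toNat c hNev]
    by_cases hc : pvLstL num.toNat (c + 1) = pvAIdent num
    · rw [if_pos hc, if_pos ((hcond (c + 1)).mp hc)]
    · rw [if_neg hc, if_neg (fun h => hc ((hcond (c + 1)).mpr h))]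
      have hstep : PySem.Int.mod (PySem.Int.mod (2 ^ (c + 1)) (num - 1) * 2) (num - 1)
          = PySem.Int.mod (2 ^ (c + 1 + 1)) (num - 1) := by
        rw [PySem.Int.mod_eq_emod_of_pos hmpos, PySem.Int.mod_eq_emod_of_pos hmpos,
          PySem.Int.mod_eq_emod_of_pos hmpos]
        conv_rhs => rw [pow_succ, Int.mul_emod]
        rw [Int.mul_emod, Int.emod_emod_of_dvd _ dvd_rfl]
      rw [hstep]
      have := ih (c + 1)
      push_cast at this ⊢
      convert this using 2

theorem shuffle_count_eq_nonpos (num : Int) (h : num ≤ 0) :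
    shuffle_count num = 1 := by
  have hid : pvAIdent num = [] := by
    unfold pvAIdent
    exact PySem.List.pyRange_one_eq_nil (by omega)
  have htn : num.toNat = 0 := by omega
  have hround : pvARound [] [] = [] := rfl
  unfold shuffle_count
  simp only [hid, htn, List.length_nil, Nat.cast_zero]
  have hpr : PySem.List.pyRange 0 0 1 = [] := PySem.List.pyRange_one_eq_nil (by omega)
  simp only [hpr, List.filter_nil, pvALoop, hround, hid]
  norm_num

-- ===== VERDICT (by name: the statement is the Claim_ definition above) =====
theorem shuffle_count_spec : Claim_equal_shuffle_count := by
  intro num _ hpre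
  unfold Spec_shuffle_count shuffle_count_alt
  by_cases hle : num ≤ 0
  · rw [if_pos hle]
    exact shuffle_count_eq_nonpos num hle
  · have hev : PySem.Int.mod num 2 = 0 := hpre.resolve_left hle
    have h2 : 2 ≤ num := by
      rw [PySem.Int.mod_eq_emod_of_pos (by norm_num)] at hev
      omega
    have hNev : num.toNat % 2 = 0 := by
      rw [PySem.Int.mod_eq_emod_of_pos (by norm_num)] at hev
      omega
    rw [if_neg hle]
    unfold shuffle_count
    have hlen : (pvAIdent num).length = num.toNat := by
      unfold pvAIdent
      rw [PySem.List.length_pyRange_one]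
      omega
    have hdouble : num.toNat = 2 * (num.toNat / 2) := by omega
    have hpos : (PySem.List.pyRange 0 ((pvAIdent num).length : Int) 1).filter
          (fun i => !(PySem.Int.mod i 2 == 0))
        = (List.range (num.toNat / 2)).map (fun (j : Nat) => (2 * (j : Int) + 1)) := by
      rw [hlen]
      conv_lhs => rw [hdouble]
      exact pvPosChar (num.toNat / 2)
    simp only [hpos]
    conv_lhs => rw [pvIdent_lstL num (by omega)]
    have := pvSync num h2 hev (num.toNat + 1) 0
    simp only [Nat.cast_zero, zero_add] at this
    rw [this]
    norm_num
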